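-- pv_equiv track=rewrite | github.com/SigmaCode/POM-QQ | CS/2023-2024/November/batches.py | is_valid_batchset
-- ===== SOURCE A (Python) =====
-- def is_valid_batchset(batches):
--     """Determines if batchset contains the same card more than once."""
--     used_cards = set()
--     for batch in batches:
--         for card in batch:
--             if card[0] in used_cards:
--                 return False
--             used_cards.add(card[0])
--     return True
-- ===== SOURCE B (Python) =====
-- def is_valid_batchset(batches):
--     """Determines if batchset contains the same card more than once."""
--     keys = sorted(card[0] for batch in batches for card in batch)
--     return all(a != b for a, b in zip(keys, keys[1:]))
-- ===== Notes on version B (the rewrite author's own statement) =====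
-- stated objective: alternative
-- what changed: Replaces A's hash-set membership loop with a sort-and-scan: sort all first-card keys and check that no two adjacent keys in the sorted order are equal (no set is used at all).
-- outside the precondition, e.g. on is_valid_batchset([[[5], [1]], [[1, 1]], [], [[]]]): A returns False, B raises IndexError
import Mathlib
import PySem

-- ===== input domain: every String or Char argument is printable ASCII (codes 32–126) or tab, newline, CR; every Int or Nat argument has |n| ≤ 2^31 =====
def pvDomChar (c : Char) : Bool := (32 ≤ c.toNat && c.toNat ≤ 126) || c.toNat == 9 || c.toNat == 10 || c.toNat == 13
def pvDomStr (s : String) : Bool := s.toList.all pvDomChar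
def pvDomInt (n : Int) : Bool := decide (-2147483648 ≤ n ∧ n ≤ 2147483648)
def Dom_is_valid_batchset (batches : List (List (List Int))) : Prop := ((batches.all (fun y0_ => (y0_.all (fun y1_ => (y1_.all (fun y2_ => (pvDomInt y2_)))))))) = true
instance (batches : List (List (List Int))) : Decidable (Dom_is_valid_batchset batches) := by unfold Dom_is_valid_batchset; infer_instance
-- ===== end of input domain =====

-- B replaces A's grow-a-set-while-scanning early-exit loop by a sort-and-scan with no set:
-- sort all first-card keys, then check that no two adjacent sorted keys are equal (objective: alternative).

-- ===== PORT A =====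
-- inner loop over the cards of the current batch, then the remaining batches;
-- 'none' = Python raises (card[0] on an empty card, an IndexError), 'some b' = the function returns b.
def isvGo (used : PySem.Set Int) : List (List Int) → List (List (List Int)) → Option Bool
  | [], [] => some true
  | [], b :: bs => isvGo used b bs
  | card :: rest, bs =>
    match PySem.List.pyGet? card 0 with
    | none => none
    | some k =>
      if PySem.Set.contains used k then some false
      else isvGo (PySem.Set.add used k) rest bs

def is_valid_batchset (batches : List (List (List Int))) : Bool :=
  (isvGo PySem.Set.empty [] batches).getD false

-- ===== PORT B =====
-- the '.getD 0' only totalises card[0] on inputs outside Pre_ (where the Python raises)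
def is_valid_batchset_alt (batches : List (List (List Int))) : Bool :=
  let keys := PySem.List.sorted
    (batches.flatMap (fun batch => batch.map (fun card => (PySem.List.pyGet? card 0).getD 0)))
    (fun x => x) false
  (keys.zip keys.tail).all (fun p => p.1 != p.2)

-- ===== PRECONDITION & SPEC =====
-- Pre_ excludes batchsets containing an empty card: card[0] raises IndexError (in B always; in A
-- too unless its early-exit loop hits a duplicate key first, in which case A returns False).
def Pre_is_valid_batchset (batches : List (List (List Int))) : Prop :=
  (batches.all (fun batch => batch.all (fun card => !card.isEmpty))) = true
instance (batches : List (List (List Int))) : Decidable (Pre_is_valid_batchset batches) := by unfold Pre_is_valid_batchset; infer_instance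

def pvWitness_is_valid_batchset : List (List (List Int)) := [[[1, 2], [3]], [[4]]]

def Spec_is_valid_batchset (batches : List (List (List Int))) (out : Bool) : Prop := out = is_valid_batchset_alt batches
instance (batches : List (List (List Int))) (out : Bool) : Decidable (Spec_is_valid_batchset batches out) := by unfold Spec_is_valid_batchset; infer_instance

-- ===== CLAIM (what is proved, stated in full; the proofs are below) =====
def Claim_equal_is_valid_batchset : Prop := ∀ (batches : List (List (List Int))), Dom_is_valid_batchset batches → Pre_is_valid_batchset batches → Spec_is_valid_batchset batches (is_valid_batchset batches)

-- ===== LEMMAS AND PROOFS =====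

-- the early-exit loop of A, on a flat list of keys
def fresh (used : PySem.Set Int) : List Int → Bool
  | [] => true
  | k :: ks => !PySem.Set.contains used k && fresh (PySem.Set.add used k) ks

theorem pyGet?_zero_of_ne_nil {card : List Int} (h : card ≠ []) :
    PySem.List.pyGet? card 0 = some card.headI := by
  cases card with
  | nil => exact absurd rfl h
  | cons x xs => simp [PySem.List.pyGet?, PySem.List.pyIdx?]

theorem fresh_iff (used : PySem.Set Int) (ks : List Int) :
    fresh used ks = true ↔ ks.Nodup ∧ ∀ k ∈ ks, k ∉ used := by
  induction ks generalizing used with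
  | nil => simp [fresh]
  | cons k ks ih =>
    by_cases hk : k ∈ used
    · simp [fresh, hk]
    · simp only [fresh, PySem.Set.contains_eq_decide, hk, decide_false, Bool.not_false,
        Bool.true_and, ih, List.nodup_cons, List.mem_cons]
      constructor
      · rintro ⟨hnd, hall⟩
        refine ⟨⟨fun hm => ?_, hnd⟩, ?_⟩
        · exact hall k hm ((PySem.Set.mem_add used k k).mpr (Or.inr rfl))
        · rintro x (rfl | hx)
          · exact hk
          · intro hxu
            exact hall x hx ((PySem.Set.mem_add used k x).mpr (Or.inl hxu))
      · rintro ⟨⟨hkks, hnd⟩, hall⟩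
        refine ⟨hnd, fun x hx hxu => ?_⟩
        rcases (PySem.Set.mem_add used k x).mp hxu with h | rfl
        · exact hall x (Or.inr hx) h
        · exact hkks hx

-- A's loop equals 'fresh' on the flattened key list
theorem isvGo_eq_fresh (used : PySem.Set Int) (cards : List (List Int)) (bs : List (List (List Int)))
    (hc : ∀ c ∈ cards, c ≠ []) (hb : ∀ b ∈ bs, ∀ c ∈ b, c ≠ []) :
    isvGo used cards bs =
      some (fresh used (cards.map List.headI ++ bs.flatMap (fun b => b.map List.headI))) := by
  induction used, cards, bs using isvGo.induct with
  | case1 used => simp [isvGo, fresh]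
  | case2 used b bs ih =>
    rw [isvGo, ih (hb b (by simp)) (fun b' hb' => hb b' (by simp [hb']))]
    simp
  | case3 used card rest bs hnone =>
    rw [pyGet?_zero_of_ne_nil (hc card (by simp))] at hnone
    exact absurd hnone (by simp)
  | case4 used card rest bs k hsome hmem =>
    rw [pyGet?_zero_of_ne_nil (hc card (by simp))] at hsome
    obtain rfl : card.headI = k := by injection hsome
    have hm : card.headI ∈ used := by
      simpa [PySem.Set.contains_eq_decide] using hmem
    rw [isvGo, pyGet?_zero_of_ne_nil (hc card (by simp))]
    simp [fresh, hm]
  | case5 used card rest bs k hsome hmem ih =>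
    rw [pyGet?_zero_of_ne_nil (hc card (by simp))] at hsome
    obtain rfl : card.headI = k := by injection hsome
    have hm : card.headI ∉ used := by
      simpa [PySem.Set.contains_eq_decide] using hmem
    rw [isvGo, pyGet?_zero_of_ne_nil (hc card (by simp))]
    have hih := ih (fun c hcm => hc c (by simp [hcm])) hb
    simpa [fresh, hm, PySem.Set.add, PySem.Set.contains_eq_decide] using hih

-- on a ≤-sorted list, 'no two adjacent elements are equal' is exactly Nodup
theorem adj_distinct_iff_nodup (l : List Int) (hs : l.Pairwise (· ≤ ·)) :
    ((l.zip l.tail).all (fun p => p.1 != p.2)) = true ↔ l.Nodup := by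
  induction l with
  | nil => simp
  | cons a l ih =>
    cases l with
    | nil => simp
    | cons b rest =>
      rcases List.pairwise_cons.mp hs with ⟨ha, hp⟩
      rcases List.pairwise_cons.mp hp with ⟨hbr, _⟩
      have hrec := ih hp
      simp only [List.tail_cons, List.zip_cons_cons, List.all_cons, Bool.and_eq_true,
        bne_iff_ne, ne_eq] at hrec ⊢
      rw [hrec, List.nodup_cons (a := a), List.mem_cons]
      constructor
      · rintro ⟨hab, hnd⟩
        refine ⟨fun h => ?_, hnd⟩
        rcases h with rfl | h
        · exact hab rfl
        · exact hab (le_antisymm (ha b (by simp)) (hbr a h))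
      · rintro ⟨hnm, hnd⟩
        exact ⟨fun h => hnm (Or.inl h), hnd⟩

theorem keys_rewrite (batches : List (List (List Int)))
    (hb : ∀ b ∈ batches, ∀ c ∈ b, c ≠ []) :
    batches.flatMap (fun batch => batch.map (fun card => (PySem.List.pyGet? card 0).getD 0)) =
      batches.flatMap (fun b => b.map List.headI) := by
  induction batches with
  | nil => simp
  | cons b bs ih =>
    simp only [List.flatMap_cons]
    rw [ih (fun b' hb' => hb b' (by simp [hb']))]
    congr 1
    apply List.map_congr_left
    intro c hcm
    simp [pyGet?_zero_of_ne_nil (hb b (by simp) c hcm)]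

-- ===== VERDICT (by name: the statement is the Claim_ definition above) =====
theorem is_valid_batchset_spec : Claim_equal_is_valid_batchset := by
  intro batches _ hpre
  unfold Spec_is_valid_batchset is_valid_batchset is_valid_batchset_alt
  have hb : ∀ b ∈ batches, ∀ c ∈ b, c ≠ [] := by
    intro b hbm c hcm
    have h1 := List.all_eq_true.mp hpre b hbm
    have h2 := List.all_eq_true.mp h1 c hcm
    simpa [List.isEmpty_iff] using h2
  rw [isvGo_eq_fresh PySem.Set.empty [] batches (by simp) hb, keys_rewrite batches hb]
  simp only [List.map_nil, List.nil_append, Option.getD_some]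
  set keysH := batches.flatMap (fun b => b.map List.headI) with hk
  have hbb : ∀ a b : Bool, ((a = true) ↔ (b = true)) → a = b := by decide
  apply hbb
  rw [fresh_iff,
    adj_distinct_iff_nodup _ (PySem.List.sorted_pairwise keysH (fun x => x)),
    (PySem.List.sorted_perm keysH (fun x => x) false).nodup_iff]
  simp [PySem.Set.empty]
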